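-- pv_equiv track=rewrite | github.com/noodlemaster/NCC_2018 | src/tools/index_of_coincidence.py | textksplit
-- ===== SOURCE A (Python) =====
-- import math
--
-- def textksplit(text, k):
--     listofchars = []
--     for r in range(k):
--         chars = []
--         for i in range(math.ceil(len(text)/k)):
--             try:
--                 chars.append(text[i*k+r])
--             except IndexError:
--                 pass
--         listofchars.append(chars)
--     return listofchars
-- ===== SOURCE B (Python) =====
-- def textksplit(text, k):
--     if k <= 0:
--         return []
--     listofchars = [[] for _ in range(k)]
--     for i, ch in enumerate(text):
--         listofchars[i % k].append(ch)
--     return listofchars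
-- ===== Notes on version B (the rewrite author's own statement) =====
-- stated objective: simpler
-- what changed: Replaced A's k strided scans (each probing indices r, r+k, r+2k, ... with try/except IndexError) by one linear distribution pass that appends each character to its residue-class bucket i % k, guarded by k <= 0 returning [] as A does.
import Mathlib
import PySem

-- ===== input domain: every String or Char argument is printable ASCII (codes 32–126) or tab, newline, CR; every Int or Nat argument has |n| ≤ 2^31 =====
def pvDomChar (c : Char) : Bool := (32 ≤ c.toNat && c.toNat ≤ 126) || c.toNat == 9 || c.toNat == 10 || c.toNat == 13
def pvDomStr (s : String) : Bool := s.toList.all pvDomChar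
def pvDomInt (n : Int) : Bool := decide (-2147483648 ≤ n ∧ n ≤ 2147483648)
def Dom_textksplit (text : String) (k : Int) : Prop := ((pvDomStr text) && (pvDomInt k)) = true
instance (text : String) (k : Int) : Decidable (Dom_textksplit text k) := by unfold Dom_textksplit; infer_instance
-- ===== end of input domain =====

-- B replaces A's k strided scans with one linear pass that drops each character into bucket i % k (simpler decomposition).

-- ===== PORT A =====
-- math.ceil(len(text)/k) ported as the exact ceiling division -((-n)//k); exact for the admitted lengths.
def textksplit (text : String) (k : Int) : List (List String) :=
  (PySem.List.pyRange 0 k 1).foldl (fun listofchars r =>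
    let chars : List String :=
      (PySem.List.pyRange 0 (-(PySem.Int.floordiv (-(PySem.Str.len text)) k)) 1).foldl
        (fun chars i =>
          match PySem.Str.pyGet? text (i * k + r) with
          | some c => chars ++ [String.singleton c]   -- try: append text[i*k+r]
          | none => chars)                            -- except IndexError: pass
        []
    listofchars ++ [chars]) []

-- ===== PORT B =====
def textksplit_alt (text : String) (k : Int) : List (List String) :=
  if k ≤ 0 then []
  else
    let init : List (List String) := (PySem.List.pyRange 0 k 1).map (fun _ => [])
    (PySem.List.enumerate text.toList 0).foldl
      (fun buckets p =>
        buckets.modify (PySem.Int.mod p.1 k).toNat (fun b => b ++ [String.singleton p.2]))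
      init

-- ===== PRECONDITION & SPEC =====
def Spec_textksplit (text : String) (k : Int) (out : List (List String)) : Prop := out = textksplit_alt text k
instance (text : String) (k : Int) (out : List (List String)) : Decidable (Spec_textksplit text k out) := by unfold Spec_textksplit; infer_instance

-- ===== CLAIM (what is proved, stated in full; the proofs are below) =====
def Claim_equal_textksplit : Prop := ∀ (text : String) (k : Int), Dom_textksplit text k → Spec_textksplit text k (textksplit text k)

-- ===== LEMMAS AND PROOFS =====

-- reference column: characters of l at positions ≡ r (mod K), position counter starting at s
def fcol (K : Nat) : List Char → Nat → Nat → List String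
  | [], _, _ => []
  | c :: l, s, r => (if s % K = r then [String.singleton c] else []) ++ fcol K l (s + 1) r

lemma fcol_shift (K : Nat) (l : List Char) (s r : Nat) :
    fcol K l (s + K) r = fcol K l s r := by
  induction l generalizing s with
  | nil => rfl
  | cons c l ih =>
      simp only [fcol, Nat.add_mod_right]
      rw [show s + K + 1 = (s + 1) + K by omega, ih]

lemma fcol_append (K : Nat) (a b : List Char) (s r : Nat) :
    fcol K (a ++ b) s r = fcol K a s r ++ fcol K b (s + a.length) r := by
  induction a generalizing s with
  | nil => simp [fcol]
  | cons c a ih =>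
      simp only [List.cons_append, fcol, ih, List.length_cons]
      rw [show s + 1 + a.length = s + (a.length + 1) by omega]
      simp [List.append_assoc]

lemma fcol_small (K : Nat) (xs : List Char) (s r : Nat) (h : s + xs.length ≤ K) :
    fcol K xs s r = if s ≤ r then ((xs[r - s]?).map String.singleton).toList else [] := by
  induction xs generalizing s with
  | nil => simp [fcol]
  | cons c xs ih =>
      simp only [List.length_cons] at h
      have hs : s % K = s := Nat.mod_eq_of_lt (by omega)
      simp only [fcol, hs, ih (s + 1) (by omega)]
      by_cases hr : s = r
      · subst hr
        simp [show ¬ (s + 1 ≤ s) by omega]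
      · by_cases hle : s + 1 ≤ r
        · have : r - s = (r - (s + 1)) + 1 := by omega
          simp [hr, hle, show s ≤ r by omega, this]
        · simp [hr, hle, show ¬ (s ≤ r) by omega]

-- A's r-th scan equals the reference column, for any M with l.length ≤ M * K
lemma A_col (K : Nat) (hK : 0 < K) (R : Nat) (hR : R < K) :
    ∀ n (l : List Char), l.length = n → ∀ M : Nat, l.length ≤ M * K →
      (List.range M).filterMap (fun i => (l[i * K + R]?).map String.singleton) = fcol K l 0 R := by
  intro n
  induction n using Nat.strong_induction_on with
  | _ n ih =>
    intro l hl M hM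
    rcases l with _ | ⟨c, l'⟩
    · simp [fcol]
    · set l : List Char := c :: l' with hldef
      have hn0 : 0 < l.length := by simp [hldef]
      have hM0 : 0 < M := by
        rcases Nat.eq_zero_or_pos M with h | h
        · exfalso; rw [h, Nat.zero_mul] at hM; omega
        · exact h
      obtain ⟨m, rfl⟩ : ∃ m, M = m + 1 := ⟨M - 1, by omega⟩
      -- LHS peels i = 0
      rw [List.range_succ_eq_map]
      have hdrop : ∀ i : Nat, l[(i + 1) * K + R]? = (l.drop K)[i * K + R]? := by
        intro i
        rw [List.getElem?_drop]
        congr 1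
        ring
      -- RHS splits l into take K / drop K
      have hsplit : fcol K l 0 R = fcol K (l.take K) 0 R ++ fcol K (l.drop K) 0 R := by
        conv_lhs => rw [← List.take_append_drop K l]
        rw [fcol_append]
        by_cases hKn : K ≤ l.length
        · rw [List.length_take_of_le hKn, fcol_shift]
        · simp [List.drop_eq_nil_of_le (le_of_not_ge hKn), fcol]
      have htake : fcol K (l.take K) 0 R = ((l[R]?).map String.singleton).toList := by
        rw [fcol_small K _ 0 R (by simp only [Nat.zero_add, List.length_take]; omega)]
        simp [List.getElem?_take_of_lt hR]
      have htail : (List.range m).filterMap (fun i => ((l.drop K)[i * K + R]?).map String.singleton)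
          = fcol K (l.drop K) 0 R := by
        apply ih (l.drop K).length _ _ rfl
        · have : m * K + K = (m + 1) * K := by ring
          simp only [List.length_drop]
          omega
        · simp only [List.length_drop, ← hl]
          omega
      rw [hsplit, htake, ← htail]
      simp only [List.filterMap_cons, List.filterMap_map]
      have h0 : (0 : Nat) * K + R = R := by omega
      rw [h0]
      cases hgr : l[R]? with
      | none => simp [hdrop]
      | some x => simp [hdrop]

-- A's inner try/except loop is a filterMap
lemma foldl_try (text : String) (k r : Int) (xs : List Int) (init : List String) :
    xs.foldl (fun chars i =>
        match PySem.Str.pyGet? text (i * k + r) with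
        | some c => chars ++ [String.singleton c]
        | none => chars) init
      = init ++ xs.filterMap (fun i => (PySem.Str.pyGet? text (i * k + r)).map String.singleton) := by
  induction xs generalizing init with
  | nil => simp
  | cons x xs ih =>
      simp only [List.foldl_cons, List.filterMap_cons, ih]
      cases PySem.Str.pyGet? text (x * k + r) <;> simp

-- B's distribution fold, bucketwise
lemma B_len (K : Nat) (l : List Char) (s : Int) (acc : List (List String)) :
    ((PySem.List.enumerate l s).foldl
      (fun buckets p => buckets.modify (PySem.Int.mod p.1 (K : Int)).toNat
        (fun b => b ++ [String.singleton p.2])) acc).length = acc.length := by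
  induction l generalizing s acc with
  | nil => simp [PySem.List.enumerate_nil]
  | cons c l ih => simp [PySem.List.enumerate_cons, List.foldl_cons, ih]

lemma B_col (K : Nat) (l : List Char) (s : Nat) (acc : List (List String))
    (hlen : acc.length = K) (r : Nat) (hr : r < K) :
    ((PySem.List.enumerate l (s : Int)).foldl
      (fun buckets p => buckets.modify (PySem.Int.mod p.1 (K : Int)).toNat
        (fun b => b ++ [String.singleton p.2])) acc)[r]?
      = some (acc[r]'(by omega) ++ fcol K l s r) := by
  induction l generalizing s acc with
  | nil =>
      simp [PySem.List.enumerate_nil, fcol, List.getElem?_eq_getElem (by omega : r < acc.length)]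
  | cons c l ih =>
      rw [PySem.List.enumerate_cons, List.foldl_cons]
      have hcast : (s : Int) + 1 = ((s + 1 : Nat) : Int) := by push_cast; ring
      have hmod : (PySem.Int.mod (s : Int) (K : Int)).toNat = s % K := by
        rw [PySem.Int.mod_natCast]; exact Int.toNat_natCast _
      rw [hcast, hmod, ih (s + 1) _ (by simp [hlen]) ]
      have hgetm : ∀ (h : r < (acc.modify (s % K) (fun b => b ++ [String.singleton c])).length),
          (acc.modify (s % K) (fun b => b ++ [String.singleton c]))[r]'h
            = if s % K = r then acc[r]'(by omega) ++ [String.singleton c] else acc[r]'(by omega) := by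
        intro h
        rw [List.getElem_modify]
      rw [hgetm (by simp; omega)]
      simp only [fcol]
      by_cases hc : s % K = r <;> simp [hc]

-- bridge: Int-level pyRange map to Nat-level range, both sides
lemma textksplit_pos (text : String) (k : Int) (hk : 0 < k) :
    textksplit text k = (List.range k.toNat).map (fun R => fcol k.toNat text.toList 0 R) := by
  have hKk : ((k.toNat : Int)) = k := Int.toNat_of_nonneg (by omega)
  set K := k.toNat with hK
  have hK0 : 0 < K := by omega
  set l := text.toList with hl
  set n := l.length with hn
  -- the ceiling value
  set q : Int := -(PySem.Int.floordiv (-(PySem.Str.len text)) k) with hq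
  have hlen : PySem.Str.len text = (n : Int) := by
    rw [PySem.Str.len_eq]
  have hbound : ((q - 1) * k < (n : Int)) ∧ ((n : Int)) ≤ q * k := by
    have := (PySem.Int.neg_floordiv_neg_eq_iff_of_pos (a := (n : Int)) (b := k) (q := q) hk).1
    rw [← hlen] at this
    exact this rfl
  have hq0 : 0 ≤ q := by
    by_contra h
    have h1 : q ≤ -1 := by omega
    have : q * k ≤ (-1) * k := by
      apply mul_le_mul_of_nonneg_right h1 (by omega)
    have : q * k < 0 := by omega
    omega
  have hMbound : n ≤ q.toNat * K := by
    have : ((q.toNat * K : Nat) : Int) = q * k := by push_cast [hKk]; rw [Int.toNat_of_nonneg hq0]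
    omega
  unfold textksplit
  rw [PySem.List.foldl_append_singleton_eq_map, List.nil_append]
  have houter : PySem.List.pyRange 0 k 1 = (List.range K).map (fun t : Nat => ((t : Int))) := by
    rw [PySem.List.pyRange_one]
    simp [hK]
  rw [houter, List.map_map]
  apply List.map_congr_left
  intro R hR
  have hRlt : R < K := List.mem_range.1 hR
  simp only [Function.comp_def, ← hq]
  rw [foldl_try, List.nil_append, PySem.List.pyRange_one]
  simp only [sub_zero, List.filterMap_map]
  rw [← A_col K hK0 R hRlt n l rfl q.toNat hMbound]
  apply List.filterMap_congr
  intro i _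
  simp only [Function.comp_def, zero_add]
  have hcast : ((i : Int)) * k + ((R : Nat) : Int) = (((i * K + R : Nat)) : Int) := by
    push_cast [hKk]; ring
  rw [hcast, PySem.Str.pyGet?_natCast]

lemma textksplit_alt_pos (text : String) (k : Int) (hk : 0 < k) :
    textksplit_alt text k = (List.range k.toNat).map (fun R => fcol k.toNat text.toList 0 R) := by
  have hKk : ((k.toNat : Int)) = k := Int.toNat_of_nonneg (by omega)
  set K := k.toNat with hK
  have hK0 : 0 < K := by omega
  unfold textksplit_alt
  rw [if_neg (by omega)]
  have hinit : ((PySem.List.pyRange 0 k 1).map (fun _ => ([] : List String))) = List.replicate K [] := by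
    refine List.eq_replicate_iff.2 ⟨?_, ?_⟩
    · rw [List.length_map, PySem.List.length_pyRange_one]
      simp [hK]
    · intro b hb
      rcases List.mem_map.1 hb with ⟨x, _, h⟩
      exact h.symm
  rw [hinit, ← hKk]
  have hlenrep : (List.replicate K ([] : List String)).length = K := by simp
  apply List.ext_getElem?
  intro r
  by_cases hr : r < K
  · have hB := B_col K text.toList 0 (List.replicate K []) hlenrep r hr
    rw [show ((0 : Nat) : Int) = (0 : Int) from rfl] at hB
    rw [hB]
    simp [List.getElem?_map, List.getElem?_range hr, List.getElem_replicate]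
  · rw [List.getElem?_eq_none, List.getElem?_eq_none]
    · simp; omega
    · rw [B_len]; simp; omega

-- ===== VERDICT (by name: the statement is the Claim_ definition above) =====
theorem textksplit_spec : Claim_equal_textksplit := by
  intro text k _
  unfold Spec_textksplit
  by_cases hk : 0 < k
  · rw [textksplit_pos text k hk, textksplit_alt_pos text k hk]
  · unfold textksplit textksplit_alt
    have houter : PySem.List.pyRange 0 k 1 = [] := PySem.List.pyRange_one_eq_nil (by omega)
    rw [houter]
    simp [if_pos (by omega : k ≤ 0)]
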